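-- pv_equiv track=rewrite | github.com/allenai/document-qa | data_processing/text_utils.py | get_word_span
-- ===== SOURCE A (Python) =====
-- from typing import List, Tuple
--
-- def get_word_span(spanss: List[List[Tuple[int, int]]], start: int, stop: int) -> List[Tuple[int, int]]:
--     idxs = []
--     for sent_idx, spans in enumerate(spanss):
--         for word_idx, span in enumerate(spans):
--             if span[1] > start:
--                 if span[0] < stop:
--                     idxs.append((sent_idx, word_idx))
--                 else:
--                     break
--     return idxs
-- ===== SOURCE B (Python) =====
-- from typing import List, Tuple
--
-- def get_word_span(spanss: List[List[Tuple[int, int]]], start: int, stop: int) -> List[Tuple[int, int]]: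
--     out = []
--     for sent_idx, spans in enumerate(spanss):
--         cut = next((i for i, s in enumerate(spans) if s[1] > start and s[0] >= stop), len(spans))
--         out.extend((sent_idx, i) for i, s in enumerate(spans[:cut]) if s[1] > start)
--     return out
-- ===== Notes on version B (the rewrite author's own statement) =====
-- stated objective: alternative
-- what changed: A's stateful inner loop-with-break is replaced by computing, per sentence, the cut index of the first breaking word and then filtering/enumerating the prefix slice; same linear cost, different decomposition.
import Mathlib
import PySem

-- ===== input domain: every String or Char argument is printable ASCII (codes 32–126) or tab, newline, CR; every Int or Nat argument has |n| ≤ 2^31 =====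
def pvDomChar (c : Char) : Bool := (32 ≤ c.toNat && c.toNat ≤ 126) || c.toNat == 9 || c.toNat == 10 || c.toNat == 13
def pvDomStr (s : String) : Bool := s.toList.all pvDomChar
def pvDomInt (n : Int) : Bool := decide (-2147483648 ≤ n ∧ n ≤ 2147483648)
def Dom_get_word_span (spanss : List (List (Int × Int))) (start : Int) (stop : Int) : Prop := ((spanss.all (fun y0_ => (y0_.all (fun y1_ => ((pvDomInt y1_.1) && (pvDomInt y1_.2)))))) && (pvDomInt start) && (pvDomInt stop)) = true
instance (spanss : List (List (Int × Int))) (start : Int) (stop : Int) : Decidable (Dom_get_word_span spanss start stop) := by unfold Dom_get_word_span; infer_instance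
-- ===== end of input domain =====

-- B replaces A's stateful inner loop-with-break by first computing the cut index
-- (first word that would break) and then filtering the prefix; same cost, plainer decomposition.

-- ===== PORT A =====
-- inner 'for word_idx, span in enumerate(spans)' loop with its break, appending to idxs
def pvInnerA (start stop sent : Int) : List (Int × Int) → Int → List (Int × Int) → List (Int × Int)
  | [], _, acc => acc
  | s :: rest, w, acc =>
    if s.2 > start then
      if s.1 < stop then pvInnerA start stop sent rest (w + 1) (acc ++ [(sent, w)])
      else acc
    else pvInnerA start stop sent rest (w + 1) acc

def get_word_span (spanss : List (List (Int × Int))) (start : Int) (stop : Int) : List (Int × Int) :=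
  (PySem.List.enumerate spanss).foldl (fun idxs p => pvInnerA start stop p.1 p.2 0 idxs) []

-- ===== PORT B =====
-- per sentence: cut = first index whose word would break; emit filtered prefix
def pvSentB (start stop : Int) (p : Int × List (Int × Int)) : List (Int × Int) :=
  let cut := p.2.findIdx (fun s => decide (s.2 > start) && decide (s.1 ≥ stop))
  ((PySem.List.enumerate (p.2.take cut)).filter (fun q => decide (q.2.2 > start))).map
    (fun q => (p.1, q.1))

def get_word_span_alt (spanss : List (List (Int × Int))) (start : Int) (stop : Int) : List (Int × Int) :=
  (PySem.List.enumerate spanss).foldl (fun out p => out ++ pvSentB start stop p) []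

-- ===== PRECONDITION & SPEC =====
def Spec_get_word_span (spanss : List (List (Int × Int))) (start : Int) (stop : Int) (out : List (Int × Int)) : Prop := out = get_word_span_alt spanss start stop
instance (spanss : List (List (Int × Int))) (start : Int) (stop : Int) (out : List (Int × Int)) : Decidable (Spec_get_word_span spanss start stop out) := by unfold Spec_get_word_span; infer_instance

-- ===== CLAIM (what is proved, stated in full; the proofs are below) =====
def Claim_equal_get_word_span : Prop := ∀ (spanss : List (List (Int × Int))) (start : Int) (stop : Int), Dom_get_word_span spanss start stop → Spec_get_word_span spanss start stop (get_word_span spanss start stop)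

-- ===== LEMMAS AND PROOFS =====

-- A's inner loop equals B's cut-then-filter on one sentence, for any index offset/accumulator.
theorem pvInner_eq (start stop sent : Int) (spans : List (Int × Int)) :
    ∀ (w : Int) (acc : List (Int × Int)),
      pvInnerA start stop sent spans w acc =
        acc ++ ((PySem.List.enumerate
            (spans.take (spans.findIdx (fun s => decide (s.2 > start) && decide (s.1 ≥ stop)))) w).filter
            (fun q => decide (q.2.2 > start))).map (fun q => (sent, q.1)) := by
  induction spans with
  | nil => intro w acc; simp [pvInnerA]
  | cons s rest ih =>
    intro w acc
    by_cases h1 : s.2 > start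
    · by_cases h2 : s.1 < stop
      · have hp : (decide (s.2 > start) && decide (s.1 ≥ stop)) = false := by
          simp [h1]; omega
        simp only [pvInnerA, if_pos h1, if_pos h2, List.findIdx_cons, hp, cond_false,
          List.take_succ_cons, PySem.List.enumerate_cons, List.filter_cons]
        simp only [h1, decide_true, ih (w + 1) (acc ++ [(sent, w)])]
        simp
      · have hp : (decide (s.2 > start) && decide (s.1 ≥ stop)) = true := by
          simp [h1]; omega
        simp [pvInnerA, if_pos h1, if_neg h2, List.findIdx_cons, hp]
    · have hp : (decide (s.2 > start) && decide (s.1 ≥ stop)) = false := by simp [h1]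
      simp only [pvInnerA, if_neg h1, List.findIdx_cons, hp, cond_false,
        List.take_succ_cons, PySem.List.enumerate_cons, List.filter_cons]
      simp only [h1, decide_false, ih (w + 1) acc]
      simp

-- ===== VERDICT (by name: the statement is the Claim_ definition above) =====
theorem get_word_span_spec : Claim_equal_get_word_span := by
  intro spanss start stop _
  unfold Spec_get_word_span get_word_span get_word_span_alt
  have : (fun (idxs : List (Int × Int)) (p : Int × List (Int × Int)) =>
      pvInnerA start stop p.1 p.2 0 idxs) =
      (fun out p => out ++ pvSentB start stop p) := by
    funext acc p
    exact pvInner_eq start stop p.1 p.2 0 acc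
  rw [this]
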